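-- pv_equiv track=rewrite | github.com/robertZaufall/amadeus-seatmap-bc | seatmap_display.py | _build_compact_header_primary_line
-- ===== SOURCE A (Python) =====
-- def _build_compact_header_primary_line(
--     date_label: str,
--     route_label: str,
--     flight_label: str,
-- ) -> tuple[str, dict[str, int | None]]:
--     layout: dict[str, int | None] = {
--         'route_start': None,
--         'flight_start': None,
--         'flight_end': None,
--         'line_length': 0,
--     }
--     builder: list[str] = []
--     current_index = 0
--     sequence = (
--         ('date', date_label),
--         ('route', route_label),
--         ('flight', flight_label),
--     )
--     for name, value in sequence:
--         if not value:
--             continue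
--         if builder:
--             builder.append(' ')
--             current_index += 1
--         if name == 'route':
--             layout['route_start'] = current_index
--         if name == 'flight':
--             layout['flight_start'] = current_index
--         builder.append(value)
--         current_index += len(value)
--         if name == 'flight':
--             layout['flight_end'] = current_index
--     line = ''.join(builder)
--     layout['line_length'] = len(line)
--     return line, layout
-- ===== SOURCE B (Python) =====
-- def _build_compact_header_primary_line(
--     date_label: str,
--     route_label: str,
--     flight_label: str,
-- ) -> tuple[str, dict[str, int | None]]:
--     present = [
--         (name, value)
--         for name, value in (
--             ('date', date_label),
--             ('route', route_label),
--             ('flight', flight_label),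
--         )
--         if value
--     ]
--     line = ' '.join(value for _, value in present)
--     starts: dict[str, int] = {}
--     offset = 0
--     for name, value in present:
--         starts[name] = offset
--         offset += len(value) + 1
--     layout: dict[str, int | None] = {
--         'route_start': starts.get('route'),
--         'flight_start': starts.get('flight'),
--         'flight_end': starts['flight'] + len(flight_label) if 'flight' in starts else None,
--         'line_length': len(line),
--     }
--     return line, layout
-- ===== Notes on version B (the rewrite author's own statement) =====
-- stated objective: alternative
-- what changed: B separates string assembly from position derivation: it filters the fixed sequence into the present segments, joins them with ' ', and computes each start as a prefix sum of earlier segment lengths plus separators, instead of threading a running index and in-place dict updates through one loop.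
import Mathlib
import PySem

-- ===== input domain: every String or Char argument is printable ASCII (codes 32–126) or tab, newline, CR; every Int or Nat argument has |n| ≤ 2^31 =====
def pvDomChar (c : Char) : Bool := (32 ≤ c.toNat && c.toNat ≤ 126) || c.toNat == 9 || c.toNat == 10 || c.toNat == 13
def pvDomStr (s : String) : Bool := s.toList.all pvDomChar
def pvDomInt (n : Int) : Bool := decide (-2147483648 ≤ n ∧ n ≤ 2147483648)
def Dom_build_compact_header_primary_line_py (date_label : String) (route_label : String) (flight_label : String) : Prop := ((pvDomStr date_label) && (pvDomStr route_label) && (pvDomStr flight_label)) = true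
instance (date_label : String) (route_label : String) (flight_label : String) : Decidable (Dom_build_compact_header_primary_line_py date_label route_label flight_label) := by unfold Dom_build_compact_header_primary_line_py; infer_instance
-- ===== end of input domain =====

-- B rebuilds the same line and layout by filtering the present segments first, joining them
-- with ' ', and deriving each start as a prefix sum — instead of A's single loop that threads
-- a running index and updates the dict in place (objective: alternative decomposition).

-- ===== PORT A =====
def build_compact_header_primary_line_py (date_label : String) (route_label : String) (flight_label : String) : String × (List (String × Option Int)) :=
  let layout : PySem.Dict String (Option Int) :=
    PySem.Dict.ofList [("route_start", none), ("flight_start", none), ("flight_end", none), ("line_length", some 0)]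
  let sequence : List (String × String) :=
    [("date", date_label), ("route", route_label), ("flight", flight_label)]
  let st :=
    sequence.foldl (fun (acc : List String × Int × PySem.Dict String (Option Int)) nv =>
      let builder := acc.1
      let current_index := acc.2.1
      let layout := acc.2.2
      let name := nv.1
      let value := nv.2
      if value.toList.isEmpty then acc  -- 'if not value: continue'
      else
        let builder := if builder.isEmpty then builder else builder ++ [" "]
        let current_index := if acc.1.isEmpty then current_index else current_index + 1
        let layout := if name == "route" then layout.insert "route_start" (some current_index) else layout
        let layout := if name == "flight" then layout.insert "flight_start" (some current_index) else layout
        let builder := builder ++ [value]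
        let current_index := current_index + PySem.Str.len value
        let layout := if name == "flight" then layout.insert "flight_end" (some current_index) else layout
        (builder, current_index, layout))
      ([], 0, layout)
  let line := PySem.Str.join "" st.1
  let layout := st.2.2.insert "line_length" (some (PySem.Str.len line))
  (line, layout.items)

-- ===== PORT B =====
def build_compact_header_primary_line_py_alt (date_label : String) (route_label : String) (flight_label : String) : String × (List (String × Option Int)) :=
  let sequence : List (String × String) :=
    [("date", date_label), ("route", route_label), ("flight", flight_label)]
  let present := sequence.filter (fun nv => !nv.2.toList.isEmpty)
  let line := PySem.Str.join " " (present.map (·.2))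
  let st :=
    present.foldl (fun (acc : PySem.Dict String Int × Int) nv =>
      (acc.1.insert nv.1 acc.2, acc.2 + PySem.Str.len nv.2 + 1))
      (PySem.Dict.empty, 0)
  let starts := st.1
  let layout : List (String × Option Int) :=
    [("route_start", starts.get? "route"),
     ("flight_start", starts.get? "flight"),
     ("flight_end", (starts.get? "flight").map (· + PySem.Str.len flight_label)),
     ("line_length", some (PySem.Str.len line))]
  (line, layout)

-- ===== PRECONDITION & SPEC =====
def Spec_build_compact_header_primary_line_py (date_label : String) (route_label : String) (flight_label : String) (out : String × (List (String × Option Int))) : Prop := out = build_compact_header_primary_line_py_alt date_label route_label flight_label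
instance (date_label : String) (route_label : String) (flight_label : String) (out : String × (List (String × Option Int))) : Decidable (Spec_build_compact_header_primary_line_py date_label route_label flight_label out) := by unfold Spec_build_compact_header_primary_line_py; infer_instance

-- ===== CLAIM (what is proved, stated in full; the proofs are below) =====
def Claim_equal_build_compact_header_primary_line_py : Prop := ∀ (date_label : String) (route_label : String) (flight_label : String), Dom_build_compact_header_primary_line_py date_label route_label flight_label → Spec_build_compact_header_primary_line_py date_label route_label flight_label (build_compact_header_primary_line_py date_label route_label flight_label)

-- ===== LEMMAS AND PROOFS =====
theorem pv_main (date_label route_label flight_label : String) :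
    build_compact_header_primary_line_py date_label route_label flight_label
      = build_compact_header_primary_line_py_alt date_label route_label flight_label := by
  by_cases hd : date_label = "" <;>
  by_cases hr : route_label = "" <;>
  by_cases hf : flight_label = "" <;>
  simp [build_compact_header_primary_line_py, build_compact_header_primary_line_py_alt,
    hd, hr, hf, PySem.Dict.insert, PySem.Dict.get?, PySem.Dict.ofList, PySem.Dict.empty,
    PySem.Dict.update, PySem.Dict.contains, PySem.Str.join, PySem.Chars.join, List.intercalate]

-- ===== VERDICT (by name: the statement is the Claim_ definition above) =====
theorem build_compact_header_primary_line_py_spec : Claim_equal_build_compact_header_primary_line_py := by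
  intro d r f _
  exact pv_main d r f
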